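-- pv_equiv track=rewrite | github.com/sceext2/html_token_tag_tree | httt/html_token_tag_tree/selector_grammar.py | _raw_split_token
-- ===== SOURCE A (Python) =====
-- def _raw_split_token(raw_text):
--     # TODO support \ chars in raw_text for split token
--     # NOTE replace some bad chars here
--     raw_text = raw_text.replace('\r', '\n').replace('\n', ' ')
--     # NOTE strip first
--     rest = raw_text.strip()
--     # scan each char to get tokens
--     mode = ''	# scan mode, can be '' (normal), '[' (for attr [])
--     one_char_token = ',> #.'
--
--     raw = []	# raw token list
--     one = ''	# one token text
--     while len(rest) > 0:
--         # get one rest char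
--         c, rest = rest[0], rest[1:]
--         # check mode
--         if mode == '[':	# attr mode
--             one += c
--             # check end char
--             if c == ']':
--                 # add current token and reset one
--                 raw.append(one)
--                 one = ''
--                 # reset mode
--                 mode = ''
--             # else, nothing to do
--         else:	# normal mode
--             # NOTE replace \t to space char
--             if c == '\t':
--                 c = ' '
--             # check one char token
--             if c in one_char_token:
--                 # add current token, and reset one
--                 raw.append(one)
--                 one = ''
--                 # add this one char token
--                 raw.append(c)
--             elif c == '[':
--                 # attr token start, add current token, and reset one
--                 raw.append(one)
--                 one = c
--                 # enable mode
--                 mode = '['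
--             else:	# normal token
--                 one += c
--     # scan done, add last token
--     raw.append(one)
--     # remove empty token ('')
--     out = [i for i in raw if i != '']
--     return out	# done
-- ===== SOURCE B (Python) =====
-- def _raw_split_token(raw_text):
--     # same preamble as the original: normalize newlines, then strip
--     raw_text = raw_text.replace('\r', '\n').replace('\n', ' ')
--     s = raw_text.strip()
--     delims = ',> #.\t'
--     out = []
--     i = 0
--     n = len(s)
--     while i < n:
--         c = s[i]
--         if c == '[':
--             # attribute token: everything up to (and including) the next ']',
--             # or to the end of the string if unclosed
--             j = s.find(']', i)
--             if j == -1: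
--                 out.append(s[i:])
--                 i = n
--             else:
--                 out.append(s[i:j + 1])
--                 i = j + 1
--         elif c in delims:
--             out.append(' ' if c == '\t' else c)
--             i += 1
--         else:
--             # a maximal run of ordinary characters
--             j = i + 1
--             while j < n and s[j] not in delims and s[j] != '[':
--                 j += 1
--             out.append(s[i:j])
--             i = j
--     return out
-- ===== Notes on version B (the rewrite author's own statement) =====
-- stated objective: faster
-- what changed: The char-by-char state machine (which re-slices the remaining string on every character and keeps a mode flag, a pending-token accumulator and a final empty-token filter) is replaced by an index/span-based scanner that emits each token directly: a find of the closing bracket for attribute tokens and a maximal-run scan for ordinary tokens; no mode variable, no accumulator, no filtering pass.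
import Mathlib
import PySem

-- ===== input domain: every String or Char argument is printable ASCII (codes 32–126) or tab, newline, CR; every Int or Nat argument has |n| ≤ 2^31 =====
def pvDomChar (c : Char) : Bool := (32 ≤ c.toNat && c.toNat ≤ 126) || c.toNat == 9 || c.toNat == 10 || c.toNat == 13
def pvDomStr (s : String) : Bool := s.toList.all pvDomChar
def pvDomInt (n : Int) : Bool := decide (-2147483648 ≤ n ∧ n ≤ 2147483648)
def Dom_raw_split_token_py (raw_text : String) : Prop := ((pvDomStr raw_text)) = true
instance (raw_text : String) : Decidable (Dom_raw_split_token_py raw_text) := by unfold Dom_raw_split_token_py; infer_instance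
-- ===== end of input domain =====

-- B replaces A's char-by-char state machine (mode flag, token accumulator, empty-token filter)
-- by a span-based scanner that emits each token directly; the return values are proved equal.

-- ===== PORT A =====
-- one_char_token = ',> #.' (the five characters of the Python string literal)
def pvOneCharToken : List Char := [',', '>', ' ', '#', '.']

-- the while loop: state = (rest, mode ('[' attr mode = true), one, raw); raw grows at the back
def pvLoopA : List Char → Bool → List Char → List String → List String
  | [], _, one, raw => raw ++ [String.ofList one]          -- scan done, raw.append(one)
  | c :: rest, true, one, raw =>                           -- attr mode: one += c, check ']'
      if c = ']' then pvLoopA rest false [] (raw ++ [String.ofList (one ++ [c])])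
      else pvLoopA rest true (one ++ [c]) raw
  | c :: rest, false, one, raw =>                          -- normal mode
      let c' := if c = '\t' then ' ' else c                -- replace \t with space
      if pvOneCharToken.contains c' then
        pvLoopA rest false [] (raw ++ [String.ofList one, String.ofList [c']])
      else if c' = '[' then
        pvLoopA rest true [c'] (raw ++ [String.ofList one])
      else
        pvLoopA rest false (one ++ [c']) raw

def raw_split_token_py (raw_text : String) : List String :=
  (pvLoopA (PySem.Str.strip (PySem.Str.replace (PySem.Str.replace raw_text "\r" "\n") "\n" " ")).toList
      false [] []).filter (fun i => i ≠ "")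

-- ===== PORT B =====
-- delims = ',> #.\t'
def pvDelims : List Char := [',', '>', ' ', '#', '.', '\t']

-- a character that continues an ordinary-run token
def pvRunChar (ch : Char) : Bool := !(pvDelims.contains ch) && ch ≠ '['

-- the span-based scanner of Source B (takeWhile/dropWhile play the role of find(']') / the run scan)
def pvTokB : List Char → List String
  | [] => []
  | c :: rest =>
    if c = '[' then
      match _hfind : rest.dropWhile (· ≠ ']') with
      | [] => [String.ofList ('[' :: rest.takeWhile (· ≠ ']'))]                      -- unclosed: to end
      | _ :: rest' => String.ofList ('[' :: rest.takeWhile (· ≠ ']') ++ [']']) :: pvTokB rest'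
    else if pvDelims.contains c then
      (if c = '\t' then " " else String.ofList [c]) :: pvTokB rest
    else
      String.ofList (c :: rest.takeWhile pvRunChar) :: pvTokB (rest.dropWhile pvRunChar)
termination_by cs => cs.length
decreasing_by
  · have h1 : (rest.dropWhile (· ≠ ']')).length ≤ rest.length := rest.length_dropWhile_le _
    rw [_hfind] at h1; simp at h1 ⊢; omega
  · simp
  · have h1 : (rest.dropWhile pvRunChar).length ≤ rest.length := rest.length_dropWhile_le _
    simp; omega

def raw_split_token_py_alt (raw_text : String) : List String :=
  pvTokB (PySem.Str.strip (PySem.Str.replace (PySem.Str.replace raw_text "\r" "\n") "\n" " ")).toList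

-- ===== PRECONDITION & SPEC =====
def Spec_raw_split_token_py (raw_text : String) (out : List String) : Prop := out = raw_split_token_py_alt raw_text
instance (raw_text : String) (out : List String) : Decidable (Spec_raw_split_token_py raw_text out) := by unfold Spec_raw_split_token_py; infer_instance

-- ===== CLAIM (what is proved, stated in full; the proofs are below) =====
def Claim_equal_raw_split_token_py : Prop := ∀ (raw_text : String), Dom_raw_split_token_py raw_text → Spec_raw_split_token_py raw_text (raw_split_token_py raw_text)

-- ===== LEMMAS AND PROOFS =====

-- emit a possibly-empty pending token (what A's filter leaves of raw.append(one))
def pvEmit (one : List Char) : List String := if one = [] then [] else [String.ofList one]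

-- B's tokens when a normal-mode scan is entered with pending text `one`
def pvGlue (one cs : List Char) : List String :=
  pvEmit (one ++ cs.takeWhile pvRunChar) ++ pvTokB (cs.dropWhile pvRunChar)

-- B's tokens when a bracket scan is entered with pending text `one` (one begins with '[')
def pvBrack (one cs : List Char) : List String :=
  match cs.dropWhile (· ≠ ']') with
  | [] => [String.ofList (one ++ cs.takeWhile (· ≠ ']'))]
  | _ :: rest' => String.ofList (one ++ cs.takeWhile (· ≠ ']') ++ [']']) :: pvTokB rest'

theorem mk_ne_empty (a : Char) (l : List Char) : String.ofList (a :: l) ≠ "" := by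
  intro h
  have := congrArg String.toList h
  simp at this

theorem filter_emit (one : List Char) :
    [String.ofList one].filter (fun i => i ≠ "") = pvEmit one := by
  cases one with
  | nil => simp [pvEmit]
  | cons a l => simp [pvEmit, mk_ne_empty a l]

theorem filter_append_mk (raw : List String) (one : List Char) :
    (raw ++ [String.ofList one]).filter (fun i => i ≠ "") =
      raw.filter (fun i => i ≠ "") ++ pvEmit one := by
  rw [List.filter_append, filter_emit]

theorem filter_append_two (raw : List String) (one : List Char) (t : String) (ht : t ≠ "") :
    (raw ++ [String.ofList one, t]).filter (fun i => i ≠ "") =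
      raw.filter (fun i => i ≠ "") ++ pvEmit one ++ [t] := by
  have : [String.ofList one, t] = [String.ofList one] ++ [t] := rfl
  rw [this, ← List.append_assoc, List.filter_append, List.filter_append, filter_emit]
  simp [ht]

theorem tokB_split (cs : List Char) :
    pvTokB cs = pvEmit (cs.takeWhile pvRunChar) ++ pvTokB (cs.dropWhile pvRunChar) := by
  cases cs with
  | nil => simp [pvTokB, pvEmit]
  | cons c rest =>
    by_cases hr : pvRunChar c
    · have hb : ¬ (c = '[') := by
        intro h; rw [h] at hr; simp [pvRunChar] at hr
      have hm : c ∉ pvDelims := by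
        revert hr; simp [pvRunChar]; tauto
      rw [pvTokB]
      simp [hb, hm, hr, pvEmit]
    · simp [hr, pvEmit]

theorem tokB_bracket (rest : List Char) : pvTokB ('[' :: rest) = pvBrack ['['] rest := by
  rw [pvTokB, pvBrack]
  cases h : rest.dropWhile (· ≠ ']') <;> simp

theorem glue_nil (rest : List Char) : pvGlue [] rest = pvTokB rest := by
  rw [pvGlue, List.nil_append, ← tokB_split]

theorem glue_run {c : Char} (rest one : List Char) (h : pvRunChar c = true) :
    pvGlue one (c :: rest) = pvGlue (one ++ [c]) rest := by
  rw [pvGlue, pvGlue, List.takeWhile_cons, List.dropWhile_cons]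
  simp [h]

theorem glue_delim {c : Char} (rest one : List Char)
    (hd : pvDelims.contains c = true) (hb : c ≠ '[') :
    pvGlue one (c :: rest) =
      pvEmit one ++ (if c = '\t' then " " else String.ofList [c]) :: pvTokB rest := by
  have hm : c ∈ pvDelims := by simpa using hd
  have hr : pvRunChar c = false := by simp [pvRunChar, hm]
  rw [pvGlue, List.takeWhile_cons, List.dropWhile_cons]
  simp only [hr, Bool.false_eq_true, if_false, List.append_nil]
  rw [pvTokB]
  simp [hb, hm]

theorem glue_bracket (rest one : List Char) :
    pvGlue one ('[' :: rest) = pvEmit one ++ pvBrack ['['] rest := by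
  have hr : pvRunChar '[' = false := by decide
  rw [pvGlue, List.takeWhile_cons, List.dropWhile_cons]
  simp only [hr, Bool.false_eq_true, if_false, List.append_nil]
  rw [tokB_bracket]

theorem brack_nil (one : List Char) : pvBrack one [] = [String.ofList one] := by
  rw [pvBrack]; simp [List.dropWhile]

theorem brack_close (rest one : List Char) :
    pvBrack one (']' :: rest) = String.ofList (one ++ [']']) :: pvTokB rest := by
  rw [pvBrack]
  have h1 : (']' :: rest).dropWhile (· ≠ ']') = ']' :: rest := by
    simp
  have h2 : (']' :: rest).takeWhile (fun x => decide ¬x = ']') = [] := by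
    simp
  simp only [h1, h2, List.append_nil]

theorem brack_cont {c : Char} (rest one : List Char) (h : c ≠ ']') :
    pvBrack one (c :: rest) = pvBrack (one ++ [c]) rest := by
  rw [pvBrack, pvBrack, List.takeWhile_cons, List.dropWhile_cons]
  have hc : (decide ¬ c = ']') = true := by simp [h]
  simp only [hc, if_true]
  cases hdw : rest.dropWhile (· ≠ ']') <;> simp

-- main invariant: A's loop (followed by the filter) produces B's tokens, in both modes
theorem loopA_main (n : Nat) : ∀ cs : List Char, cs.length ≤ n →
    (∀ one raw, (pvLoopA cs false one raw).filter (fun i => i ≠ "") =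
        raw.filter (fun i => i ≠ "") ++ pvGlue one cs) ∧
    (∀ one raw, one ≠ [] → (pvLoopA cs true one raw).filter (fun i => i ≠ "") =
        raw.filter (fun i => i ≠ "") ++ pvBrack one cs) := by
  induction n with
  | zero =>
    intro cs hcs
    have : cs = [] := by cases cs <;> simp_all
    subst this
    constructor
    · intro one raw
      rw [pvLoopA, filter_append_mk, pvGlue]
      simp [List.takeWhile, List.dropWhile, pvTokB]
    · intro one raw hone
      rw [pvLoopA, filter_append_mk, brack_nil, pvEmit]
      simp [hone]
  | succ n ih =>
    intro cs hcs
    cases cs with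
    | nil =>
      constructor
      · intro one raw
        rw [pvLoopA, filter_append_mk, pvGlue]
        simp [List.takeWhile, List.dropWhile, pvTokB]
      · intro one raw hone
        rw [pvLoopA, filter_append_mk, brack_nil, pvEmit]
        simp [hone]
    | cons c rest =>
      have hrest : rest.length ≤ n := by simp at hcs; omega
      constructor
      · -- normal mode
        intro one raw
        rw [pvLoopA]
        by_cases ht : c = '\t'
        · -- tab becomes ' ', a one-char token
          subst ht
          have e1 : (if ('\t' : Char) = '\t' then ' ' else '\t') = ' ' := rfl
          rw [e1, if_pos (by decide : pvOneCharToken.contains ' ' = true)]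
          rw [(ih rest hrest).1 [] _, glue_nil,
            filter_append_two raw one _ (mk_ne_empty _ _),
            glue_delim rest one (by decide) (by decide)]
          simp
        · have e1 : (if c = '\t' then ' ' else c) = c := if_neg ht
          rw [e1]
          by_cases hd : pvOneCharToken.contains c = true
          · -- one-char token
            rw [if_pos hd]
            have hb : c ≠ '[' := by
              intro h; rw [h] at hd; revert hd; decide
            have hdd : pvDelims.contains c = true := by
              revert hd; simp [pvOneCharToken, pvDelims]
              rintro (h|h|h|h|h) <;> simp [h]
            rw [(ih rest hrest).1 [] _, glue_nil,
              filter_append_two raw one _ (mk_ne_empty _ _),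
              glue_delim rest one hdd hb]
            simp [ht]
          · rw [if_neg hd]
            by_cases hb : c = '['
            · -- bracket start
              subst hb
              rw [if_pos rfl]
              rw [(ih rest hrest).2 ['['] _ (by simp), filter_append_mk,
                glue_bracket rest one]
              simp
            · -- ordinary run character
              rw [if_neg hb]
              have h1 : pvRunChar c = true := by
                have hm : c ∉ pvDelims := by
                  simp only [pvOneCharToken] at hd
                  simp only [pvDelims, List.mem_cons, List.not_mem_nil, or_false]
                  simp at hd
                  tauto
                simp [pvRunChar, hm, hb]
              rw [(ih rest hrest).1 (one ++ [c]) raw, glue_run rest one h1]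
      · -- bracket mode
        intro one raw hone
        rw [pvLoopA]
        by_cases hc : c = ']'
        · subst hc
          rw [if_pos rfl]
          rw [(ih rest hrest).1 [] _, glue_nil, filter_append_mk, brack_close]
          cases one with
          | nil => exact absurd rfl hone
          | cons a l => simp [pvEmit]
        · rw [if_neg hc]
          rw [(ih rest hrest).2 (one ++ [c]) raw (by simp), brack_cont rest one hc]

-- ===== VERDICT (by name: the statement is the Claim_ definition above) =====
theorem raw_split_token_py_spec : Claim_equal_raw_split_token_py := by
  intro raw_text _
  unfold Spec_raw_split_token_py raw_split_token_py raw_split_token_py_alt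
  set l := (PySem.Str.strip (PySem.Str.replace (PySem.Str.replace raw_text "\r" "\n") "\n" " ")).toList
  rw [(loopA_main l.length l le_rfl).1 [] [], glue_nil]
  simp
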